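-- pv_equiv track=rewrite | github.com/uwplasma/Cyclone | fixed_functions.py | update_all_nonplanar_dofs_from_unfixed_nonplanar_dofs
-- ===== SOURCE A (Python) =====
-- def update_all_nonplanar_dofs_from_unfixed_nonplanar_dofs(nonplanar_dofs, unfixed_orders, full_nonplanar_dofs, unique_shapes):
--     unfixed_orders = sorted(unfixed_orders)
--     num_unfixed_orders = len(unfixed_orders)
--     if 0 in unfixed_orders:
--         num_unfixed_orders = num_unfixed_orders - 1
--     highest_order = int(len(full_nonplanar_dofs) / (2*2*unique_shapes))
--     updated_full_nonplanar_dofs = []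
--     tally=0
--     for i in range(unique_shapes):
--         this_updated_full_nonplanar_dofs = full_nonplanar_dofs[2*highest_order*i:2*highest_order*(i+1)]
--         for j in range(highest_order):
--             if j+1 in unfixed_orders:
--                 this_updated_full_nonplanar_dofs[2*j:2*(j+1)] = nonplanar_dofs[tally:tally+2]
--                 tally = tally + 2
--         updated_full_nonplanar_dofs.extend(this_updated_full_nonplanar_dofs)
--     return updated_full_nonplanar_dofs
-- ===== SOURCE B (Python) =====
-- def update_all_nonplanar_dofs_from_unfixed_nonplanar_dofs(nonplanar_dofs, unfixed_orders, full_nonplanar_dofs, unique_shapes):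
--     highest_order = int(len(full_nonplanar_dofs) / (2*2*unique_shapes))
--     orders = set(unfixed_orders)
--     active = [j for j in range(highest_order) if j + 1 in orders]
--     m = len(active)
--     out = []
--     for i in range(unique_shapes):
--         # rebuild the shape's chunk append-only: split it at each active order's
--         # position (tracked via len(done)), never mutating a list in place
--         done = []
--         rest = full_nonplanar_dofs[2*highest_order*i:2*highest_order*(i+1)]
--         base = 2 * i * m
--         for k, j in enumerate(active):
--             a = 2*j - len(done)
--             done = done + rest[:a] + nonplanar_dofs[base+2*k:base+2*k+2]
--             rest = rest[a+2:]
--         out = out + done + rest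
--     return out
-- ===== Notes on version B (the rewrite author's own statement) =====
-- stated objective: alternative
-- what changed: B drops A's dead sorted/num_unfixed_orders code and replaces A's in-place slice-assignment on a mutating chunk (with a running source tally) by an append-only rebuild: each shape's chunk is split left-to-right at each active order's position (tracked via len(done)) into kept segments and source blocks taken at the arithmetic offset 2*(i*m+k).
-- outside the precondition, e.g. on update_all_nonplanar_dofs_from_unfixed_nonplanar_dofs([1, 2], [1], [1, 2, 3, 4], 0): A raises ZeroDivisionError, B raises ZeroDivisionError
import Mathlib
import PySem

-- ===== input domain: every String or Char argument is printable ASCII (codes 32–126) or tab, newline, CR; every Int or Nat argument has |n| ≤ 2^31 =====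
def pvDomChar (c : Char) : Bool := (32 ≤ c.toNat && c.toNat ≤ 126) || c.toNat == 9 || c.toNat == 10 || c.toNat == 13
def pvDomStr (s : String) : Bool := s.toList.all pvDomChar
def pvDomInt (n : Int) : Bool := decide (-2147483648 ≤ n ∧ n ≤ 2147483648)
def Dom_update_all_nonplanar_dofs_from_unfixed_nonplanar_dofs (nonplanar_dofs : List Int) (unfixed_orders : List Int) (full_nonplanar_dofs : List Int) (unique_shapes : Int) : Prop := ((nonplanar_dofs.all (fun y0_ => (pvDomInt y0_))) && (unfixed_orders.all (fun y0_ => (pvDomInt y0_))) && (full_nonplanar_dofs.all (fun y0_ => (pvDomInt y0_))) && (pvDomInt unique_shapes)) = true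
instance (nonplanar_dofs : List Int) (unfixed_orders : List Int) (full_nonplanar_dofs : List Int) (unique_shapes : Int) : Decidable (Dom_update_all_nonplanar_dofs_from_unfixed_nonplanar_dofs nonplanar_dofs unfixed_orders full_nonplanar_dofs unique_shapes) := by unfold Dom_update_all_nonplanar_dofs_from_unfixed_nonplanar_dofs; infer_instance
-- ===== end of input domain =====

-- B drops A's dead sorted/num_unfixed_orders code and replaces A's in-place slice-assignment with a
-- running source tally by an append-only left-to-right rebuild of each chunk (objective: alternative).

-- Python's list slice assignment `l[a:b] = src` for 0 ≤ a ≤ b (the only form A uses):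
-- the slice is replaced by src, with Python's clamping of a and b to the list length.
def pySetSlice (l : List Int) (a b : Int) (src : List Int) : List Int :=
  PySem.List.slice l none (some a) ++ src ++ PySem.List.slice l (some b) none

-- ===== PORT A =====
-- `int(len(fd)/(2*2*u))` truncates the true quotient toward zero: Int.tdiv is exact here because
-- on Dom the float quotient len/(4u) (|len| < 2^53) never rounds across an integer boundary.
def update_all_nonplanar_dofs_from_unfixed_nonplanar_dofs (nonplanar_dofs : List Int) (unfixed_orders : List Int) (full_nonplanar_dofs : List Int) (unique_shapes : Int) : List Int :=
  let so := PySem.List.sorted unfixed_orders (fun x => x) false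
  let num_unfixed_orders : Int := (so.length : Int)
  let _num_unfixed_orders := if (0 : Int) ∈ so then num_unfixed_orders - 1 else num_unfixed_orders
  let highest_order : Int := Int.tdiv (full_nonplanar_dofs.length : Int) (2*2*unique_shapes)
  let res := (PySem.List.pyRange 0 unique_shapes 1).foldl
    (fun (st : List Int × Int) i =>
      let inner := (PySem.List.pyRange 0 highest_order 1).foldl
        (fun (cj : List Int × Int) j =>
          if (j + 1) ∈ so then
            (pySetSlice cj.1 (2*j) (2*(j+1)) (PySem.List.slice nonplanar_dofs (some cj.2) (some (cj.2 + 2))), cj.2 + 2)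
          else cj)
        (PySem.List.slice full_nonplanar_dofs (some (2*highest_order*i)) (some (2*highest_order*(i+1))), st.2)
      (st.1 ++ inner.1, inner.2))
    (([] : List Int), (0 : Int))
  res.1

-- ===== PORT B =====
def update_all_nonplanar_dofs_from_unfixed_nonplanar_dofs_alt (nonplanar_dofs : List Int) (unfixed_orders : List Int) (full_nonplanar_dofs : List Int) (unique_shapes : Int) : List Int :=
  let highest_order : Int := Int.tdiv (full_nonplanar_dofs.length : Int) (2*2*unique_shapes)
  let orders := PySem.Set.ofList unfixed_orders
  let active := (PySem.List.pyRange 0 highest_order 1).filter (fun j => decide ((j + 1) ∈ orders))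
  let m : Int := (active.length : Int)
  (PySem.List.pyRange 0 unique_shapes 1).foldl
    (fun (out : List Int) i =>
      let base := 2 * i * m
      let dr := (PySem.List.enumerate active 0).foldl
        (fun (dr : List Int × List Int) kj =>
          let a := 2*kj.2 - (dr.1.length : Int)
          (dr.1 ++ PySem.List.slice dr.2 none (some a)
               ++ PySem.List.slice nonplanar_dofs (some (base + 2*kj.1)) (some (base + 2*kj.1 + 2)),
           PySem.List.slice dr.2 (some (a + 2)) none))
        (([] : List Int), PySem.List.slice full_nonplanar_dofs (some (2*highest_order*i)) (some (2*highest_order*(i+1))))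
      out ++ dr.1 ++ dr.2)
    ([] : List Int)

-- ===== PRECONDITION & SPEC =====
-- unique_shapes = 0 makes A (and B) raise ZeroDivisionError in the highest_order computation.
def Pre_update_all_nonplanar_dofs_from_unfixed_nonplanar_dofs (nonplanar_dofs : List Int) (unfixed_orders : List Int) (full_nonplanar_dofs : List Int) (unique_shapes : Int) : Prop := unique_shapes ≠ 0
instance (nonplanar_dofs : List Int) (unfixed_orders : List Int) (full_nonplanar_dofs : List Int) (unique_shapes : Int) : Decidable (Pre_update_all_nonplanar_dofs_from_unfixed_nonplanar_dofs nonplanar_dofs unfixed_orders full_nonplanar_dofs unique_shapes) := by unfold Pre_update_all_nonplanar_dofs_from_unfixed_nonplanar_dofs; infer_instance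
def pvWitness_update_all_nonplanar_dofs_from_unfixed_nonplanar_dofs : List Int × List Int × List Int × Int := ([1, 2], [1], [3, 4, 5, 6], 1)
def Spec_update_all_nonplanar_dofs_from_unfixed_nonplanar_dofs (nonplanar_dofs : List Int) (unfixed_orders : List Int) (full_nonplanar_dofs : List Int) (unique_shapes : Int) (out : List Int) : Prop := out = update_all_nonplanar_dofs_from_unfixed_nonplanar_dofs_alt nonplanar_dofs unfixed_orders full_nonplanar_dofs unique_shapes
instance (nonplanar_dofs : List Int) (unfixed_orders : List Int) (full_nonplanar_dofs : List Int) (unique_shapes : Int) (out : List Int) : Decidable (Spec_update_all_nonplanar_dofs_from_unfixed_nonplanar_dofs nonplanar_dofs unfixed_orders full_nonplanar_dofs unique_shapes out) := by unfold Spec_update_all_nonplanar_dofs_from_unfixed_nonplanar_dofs; infer_instance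

-- ===== CLAIM (what is proved, stated in full; the proofs are below) =====
def Claim_equal_update_all_nonplanar_dofs_from_unfixed_nonplanar_dofs : Prop := ∀ (nonplanar_dofs : List Int) (unfixed_orders : List Int) (full_nonplanar_dofs : List Int) (unique_shapes : Int), Dom_update_all_nonplanar_dofs_from_unfixed_nonplanar_dofs nonplanar_dofs unfixed_orders full_nonplanar_dofs unique_shapes → Pre_update_all_nonplanar_dofs_from_unfixed_nonplanar_dofs nonplanar_dofs unfixed_orders full_nonplanar_dofs unique_shapes → Spec_update_all_nonplanar_dofs_from_unfixed_nonplanar_dofs nonplanar_dofs unfixed_orders full_nonplanar_dofs unique_shapes (update_all_nonplanar_dofs_from_unfixed_nonplanar_dofs nonplanar_dofs unfixed_orders full_nonplanar_dofs unique_shapes)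

-- ===== LEMMAS AND PROOFS =====

-- A's inner loop: a conditional pass over all orders threading a running tally equals a pass over
-- the filtered (active) orders with the source offset computed arithmetically.
lemma pv_inner_eq (np : List Int) (P : Int → Prop) [DecidablePred P] :
    ∀ (l : List Int) (c : List Int) (base k0 t : Int), t = base + 2*k0 →
    l.foldl
      (fun (cj : List Int × Int) j =>
        if P j then
          (pySetSlice cj.1 (2*j) (2*(j+1)) (PySem.List.slice np (some cj.2) (some (cj.2 + 2))), cj.2 + 2)
        else cj)
      (c, t)
    = ((PySem.List.enumerate (l.filter (fun j => decide (P j))) k0).foldl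
        (fun (c' : List Int) (kj : Int × Int) =>
          pySetSlice c' (2*kj.2) (2*(kj.2+1)) (PySem.List.slice np (some (base + 2*kj.1)) (some (base + 2*kj.1 + 2))))
        c,
       base + 2*(k0 + (((l.filter (fun j => decide (P j))).length : Int)))) := by
  intro l
  induction l with
  | nil => intro c base k0 t ht; subst ht; simp [PySem.List.enumerate_nil]
  | cons j l ih =>
    intro c base k0 t ht
    subst ht
    by_cases hj : P j
    · have hf : List.filter (fun j => decide (P j)) (j :: l)
          = j :: List.filter (fun j => decide (P j)) l := by
        simp [hj]
      rw [List.foldl_cons, if_pos hj, hf, PySem.List.enumerate_cons, List.foldl_cons,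
        ih _ base (k0 + 1) _ (by ring), Prod.ext_iff]
      exact ⟨rfl, by simp only [List.length_cons]; push_cast; ring⟩
    · have hf : List.filter (fun j => decide (P j)) (j :: l)
          = List.filter (fun j => decide (P j)) l := by
        simp [hj]
      rw [List.foldl_cons, if_neg hj, hf]
      exact ih c base k0 _ rfl

-- A's outer loop: the tally entering shape i is 2*m*i, B's arithmetic base offset.
lemma pv_outer_eq (np fd : List Int) (P : Int → Prop) [DecidablePred P] (h : Int)
    (act : List Int) (hact : act = (PySem.List.pyRange 0 h 1).filter (fun j => decide (P j)))
    (m : Int) (hm : m = (act.length : Int)) :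
    ∀ (n : Nat) (i0 : Int) (acc : List Int) (t : Int), t = 2*m*i0 →
    (PySem.List.pyRange i0 (i0 + (n : Int)) 1).foldl
      (fun (st : List Int × Int) i =>
        let inner := (PySem.List.pyRange 0 h 1).foldl
          (fun (cj : List Int × Int) j =>
            if P j then
              (pySetSlice cj.1 (2*j) (2*(j+1)) (PySem.List.slice np (some cj.2) (some (cj.2 + 2))), cj.2 + 2)
            else cj)
          (PySem.List.slice fd (some (2*h*i)) (some (2*h*(i+1))), st.2)
        (st.1 ++ inner.1, inner.2))
      (acc, t)
    = ((PySem.List.pyRange i0 (i0 + (n : Int)) 1).foldl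
        (fun (out : List Int) i =>
          out ++ (PySem.List.enumerate act 0).foldl
            (fun (c : List Int) (kj : Int × Int) =>
              pySetSlice c (2*kj.2) (2*(kj.2+1)) (PySem.List.slice np (some (2*i*m + 2*kj.1)) (some (2*i*m + 2*kj.1 + 2))))
            (PySem.List.slice fd (some (2*h*i)) (some (2*h*(i+1)))))
        acc,
       2*m*(i0 + (n : Int))) := by
  intro n
  induction n with
  | zero =>
    intro i0 acc t ht
    rw [PySem.List.pyRange_one_eq_nil (a := i0) (b := i0 + ((0 : Nat) : Int)) (by omega)]
    simp [ht]
  | succ n ih =>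
    intro i0 acc t ht
    subst ht
    have hb : i0 + ((n + 1 : Nat) : Int) = (i0 + 1) + (n : Int) := by push_cast; ring
    rw [hb, PySem.List.pyRange_one_cons (a := i0) (b := i0 + 1 + (n : Int)) (by omega), List.foldl_cons, List.foldl_cons]
    dsimp only
    rw [pv_inner_eq np P (PySem.List.pyRange 0 h 1)
        (PySem.List.slice fd (some (2*h*i0)) (some (2*h*(i0+1)))) (2*m*i0) 0 (2*m*i0) (by ring),
      ← hact, ← hm]
    dsimp only
    have hmul : 2*m*i0 = 2*i0*m := by ring
    rw [hmul, ih (i0 + 1) _ (2*i0*m + 2*(0 + m)) (by ring)]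

-- The core correspondence: a sequence of slice assignments at strictly increasing even positions
-- (each replacement at most 2 long) equals B's append-only split of the chunk into done/rest.
lemma pv_split (S : Int → List Int) :
    ∀ (l : List (Int × Int)) (done rest : List Int),
    l.Pairwise (fun p q => p.2 + 1 ≤ q.2) →
    (∀ p ∈ l, ((S p.1).length : Int) ≤ 2) →
    (∀ p ∈ l, (done.length : Int) ≤ 2 * p.2) →
    l.foldl (fun c (kj : Int × Int) => pySetSlice c (2*kj.2) (2*(kj.2+1)) (S kj.1)) (done ++ rest)
    = (fun dr : List Int × List Int => dr.1 ++ dr.2)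
        (l.foldl
          (fun (dr : List Int × List Int) kj =>
            (dr.1 ++ PySem.List.slice dr.2 none (some (2*kj.2 - (dr.1.length : Int))) ++ S kj.1,
             PySem.List.slice dr.2 (some ((2*kj.2 - (dr.1.length : Int)) + 2)) none))
          (done, rest)) := by
  intro l
  induction l with
  | nil => intro done rest _ _ _; simp
  | cons p l ih =>
    intro done rest hpw hS hpos
    obtain ⟨k, j⟩ := p
    have hj : (done.length : Int) ≤ 2 * j := hpos (k, j) (by simp)
    have hj0 : 0 ≤ 2 * j - (done.length : Int) := by omega
    rw [List.foldl_cons, List.foldl_cons]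
    dsimp only
    -- the one-step equality
    have hstep : pySetSlice (done ++ rest) (2*j) (2*(j+1)) (S k)
        = (done ++ PySem.List.slice rest none (some (2*j - (done.length : Int))) ++ S k)
          ++ PySem.List.slice rest (some ((2*j - (done.length : Int)) + 2)) none := by
      unfold pySetSlice
      rw [PySem.List.slice_to (done ++ rest) (by omega), PySem.List.slice_from (done ++ rest) (by omega),
        PySem.List.slice_to rest (by omega), PySem.List.slice_from rest (by omega)]
      have ht : (done ++ rest).take (2*j).toNat
          = done ++ rest.take (2*j - (done.length : Int)).toNat := by
        rw [List.take_append, List.take_of_length_le (by omega),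
          show (2*j).toNat - done.length = (2*j - (done.length : Int)).toNat from by omega]
      have hd : (done ++ rest).drop (2*(j+1)).toNat
          = rest.drop ((2*j - (done.length : Int)) + 2).toNat := by
        rw [List.drop_append, List.drop_eq_nil_of_le (by omega),
          show (2*(j+1)).toNat - done.length = ((2*j - (done.length : Int)) + 2).toNat from by omega,
          List.nil_append]
      rw [ht, hd]
    rw [hstep]
    -- the invariant for the tail
    have hlen : ∀ q ∈ l,
        (((done ++ PySem.List.slice rest none (some (2*j - (done.length : Int))) ++ S k).length : Int)) ≤ 2 * q.2 := by
      intro q hq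
      have hrel : j + 1 ≤ q.2 := (List.pairwise_cons.mp hpw).1 q hq
      have hSk : ((S k).length : Int) ≤ 2 := hS (k, j) (by simp)
      have htk : ((PySem.List.slice rest none (some (2*j - (done.length : Int)))).length : Int)
          ≤ 2*j - (done.length : Int) := by
        rw [PySem.List.slice_to rest (by omega)]
        have := List.length_take_le (2*j - (done.length : Int)).toNat rest
        omega
      simp only [List.length_append]
      push_cast
      omega
    exact ih _ _ (List.pairwise_cons.mp hpw).2 (fun q hq => hS q (by simp [hq])) hlen

-- Pairwise on the elements lifts to Pairwise on their second components in enumerate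
lemma pv_pairwise_enumerate {R : Int → Int → Prop} :
    ∀ (xs : List Int) (s : Int), xs.Pairwise R →
    (PySem.List.enumerate xs s).Pairwise (fun p q : Int × Int => R p.2 q.2) := by
  intro xs
  induction xs with
  | nil => intro s _; simp [PySem.List.enumerate_nil]
  | cons x xs ih =>
    intro s hpw
    rw [PySem.List.enumerate_cons, List.pairwise_cons]
    refine ⟨?_, ih (s + 1) (List.pairwise_cons.mp hpw).2⟩
    intro q hq
    have : q.2 ∈ xs := by
      have := PySem.List.map_snd_enumerate xs (s + 1)
      rw [← this]
      exact List.mem_map_of_mem hq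
    exact (List.pairwise_cons.mp hpw).1 q.2 this

-- a slice of width 2 at a nonnegative start has at most 2 elements
lemma pv_slice_len_le_two (np : List Int) (x : Int) (hx : 0 ≤ x) :
    ((PySem.List.slice np (some x) (some (x + 2))).length : Int) ≤ 2 := by
  rw [PySem.List.slice_toNat np hx (by omega)]
  have := List.length_take_le ((x + 2).toNat - x.toNat) (np.drop x.toNat)
  omega

theorem update_all_nonplanar_dofs_from_unfixed_nonplanar_dofs_spec : Claim_equal_update_all_nonplanar_dofs_from_unfixed_nonplanar_dofs := by
  intro np uo fd u _hdom hpre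
  unfold Pre_update_all_nonplanar_dofs_from_unfixed_nonplanar_dofs at hpre
  unfold Spec_update_all_nonplanar_dofs_from_unfixed_nonplanar_dofs
  unfold update_all_nonplanar_dofs_from_unfixed_nonplanar_dofs
    update_all_nonplanar_dofs_from_unfixed_nonplanar_dofs_alt
  dsimp only
  by_cases hu : u ≤ 0
  · rw [PySem.List.pyRange_one_eq_nil (a := 0) (b := u) (by omega)]
    simp
  · have hu : 0 < u := by omega
    -- abbreviations
    set h : Int := Int.tdiv (fd.length : Int) (2*2*u) with hh
    have hfun : (fun j : Int => decide ((j + 1) ∈ PySem.Set.ofList uo))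
        = (fun j : Int => decide ((j + 1) ∈ PySem.List.sorted uo (fun x => x) false)) := by
      funext j
      simp [PySem.Set.mem_ofList, PySem.List.mem_sorted]
    set act : List Int := (PySem.List.pyRange 0 h 1).filter
      (fun j : Int => decide ((j + 1) ∈ PySem.Set.ofList uo)) with hactdef
    set m : Int := (act.length : Int) with hmdef
    -- reduce A to the enumerate/pySetSlice form with arithmetic offsets
    rw [show u = 0 + ((u.toNat : Nat) : Int) from by omega]
    have H := pv_outer_eq np fd
      (fun j : Int => (j + 1) ∈ PySem.List.sorted uo (fun x => x) false)
      h act (by rw [hactdef, hfun]) m hmdef u.toNat 0 [] 0 (by ring)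
    rw [congrArg Prod.fst H]
    -- now both sides are folds over the same range; compare the bodies on members
    apply PySem.List.foldl_congr_mem
    intro out i hi
    have hi0 : 0 ≤ i := (PySem.List.mem_pyRange_one.mp hi).1
    have hm0 : 0 ≤ m := by rw [hmdef]; positivity
    -- facts about enumerate act 0
    have hsnd : (PySem.List.enumerate act 0).map (fun p : Int × Int => p.2) = act :=
      PySem.List.map_snd_enumerate act 0
    have hpw : (PySem.List.enumerate act 0).Pairwise (fun p q : Int × Int => p.2 + 1 ≤ q.2) := by
      refine pv_pairwise_enumerate (R := fun a b : Int => a + 1 ≤ b) act 0 ?_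
      rw [hactdef]
      exact ((PySem.List.pairwise_lt_pyRange_one 0 h).filter _).imp (fun hlt => by omega)
    have hmem2 : ∀ p ∈ PySem.List.enumerate act 0, 0 ≤ p.2 := by
      intro p hp
      have : p.2 ∈ act := by
        rw [← hsnd]; exact List.mem_map_of_mem hp
      rw [hactdef] at this
      exact (PySem.List.mem_pyRange_one.mp (List.mem_filter.mp this).1).1
    have hmem1 : ∀ p ∈ PySem.List.enumerate act 0, 0 ≤ p.1 := by
      intro p hp
      obtain ⟨k, hk, hpk⟩ := (PySem.List.mem_enumerate_iff act 0 p).mp hp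
      rw [hpk]; simp
    have HS := pv_split
      (fun k : Int => PySem.List.slice np (some (2*i*m + 2*k)) (some (2*i*m + 2*k + 2)))
      (PySem.List.enumerate act 0)
      []
      (PySem.List.slice fd (some (2*h*i)) (some (2*h*(i+1))))
      hpw
      (fun p hp => pv_slice_len_le_two np (2*i*m + 2*p.1)
        (by have := hmem1 p hp; positivity))
      (fun p hp => by have := hmem2 p hp; simp; omega)
    simp only [List.nil_append] at HS
    rw [HS]
    rw [List.append_assoc]

-- ===== VERDICT note: theorem above states the claim by name =====
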